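-- pv_equiv track=rewrite | github.com/laurent-croq/advent-of-code | 2020/day17-part2.py | sum_grid
-- ===== SOURCE A (Python) =====
-- grid = [ [ [] ] ]
--
-- def sum_grid(grid):
--     total = 0
--     for w in range(len(grid)):
--         for z in range(len(grid[w])):
--             for y in range(len(grid[w][z])):
--                 for x in range(len(grid[w][z][y])):
--                     total += grid[w][z][y][x]
--     return(total)
-- ===== SOURCE B (Python) =====
-- def sum_grid(grid):
--     # depth-agnostic recursive descent: recurse into lists, add scalar leaves
--     def deep_sum(x):
--         if isinstance(x, list):
--             t = 0
--             for e in x: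
--                 t += deep_sum(e)
--             return t
--         return x
--     return deep_sum(grid)
-- ===== Notes on version B (the rewrite author's own statement) =====
-- stated objective: alternative
-- what changed: Replaces the four explicit range(len(...)) index loops with a generic recursive helper that descends the nesting (isinstance check) and accumulates scalar leaves.
import Mathlib
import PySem

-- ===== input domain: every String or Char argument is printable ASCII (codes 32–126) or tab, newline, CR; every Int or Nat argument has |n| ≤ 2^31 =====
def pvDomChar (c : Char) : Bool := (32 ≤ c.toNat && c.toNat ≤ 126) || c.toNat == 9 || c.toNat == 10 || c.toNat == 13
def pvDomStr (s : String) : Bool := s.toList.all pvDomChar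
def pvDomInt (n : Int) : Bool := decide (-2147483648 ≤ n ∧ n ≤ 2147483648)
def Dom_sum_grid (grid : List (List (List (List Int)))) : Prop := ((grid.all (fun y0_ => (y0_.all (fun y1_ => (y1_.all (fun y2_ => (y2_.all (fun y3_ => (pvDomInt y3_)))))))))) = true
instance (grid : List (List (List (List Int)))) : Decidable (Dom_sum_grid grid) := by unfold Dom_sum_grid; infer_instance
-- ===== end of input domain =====

-- B replaces A's four index loops with a recursive descent over the nesting (alternative decomposition, same cost).

-- ===== PORT A =====
-- port of A: four nested loops 'for i in range(len(...))' with indexing, via pyRange/pyGetD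
def sum_grid (grid : List (List (List (List Int)))) : Int :=
  (PySem.List.pyRange 0 (grid.length : Int) 1).foldl (fun total w =>
    (PySem.List.pyRange 0 ((PySem.List.pyGetD grid w []).length : Int) 1).foldl (fun total z =>
      (PySem.List.pyRange 0 ((PySem.List.pyGetD (PySem.List.pyGetD grid w []) z []).length : Int) 1).foldl (fun total y =>
        (PySem.List.pyRange 0 ((PySem.List.pyGetD (PySem.List.pyGetD (PySem.List.pyGetD grid w []) z []) y []).length : Int) 1).foldl (fun total x =>
          total + PySem.List.pyGetD (PySem.List.pyGetD (PySem.List.pyGetD (PySem.List.pyGetD grid w []) z []) y []) x 0) total) total) total) 0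

-- ===== PORT B =====
-- port of B's recursive deep_sum: Python dispatches on isinstance at each depth; with fixed
-- nesting types this is one helper per depth, each 'sum of deep_sum of the elements'
def deepSum1 (x : List Int) : Int := x.foldl (fun t e => t + e) 0
def deepSum2 (x : List (List Int)) : Int := x.foldl (fun t e => t + deepSum1 e) 0
def deepSum3 (x : List (List (List Int))) : Int := x.foldl (fun t e => t + deepSum2 e) 0
def sum_grid_alt (grid : List (List (List (List Int)))) : Int :=
  grid.foldl (fun t e => t + deepSum3 e) 0

-- ===== PRECONDITION & SPEC =====
def Spec_sum_grid (grid : List (List (List (List Int)))) (out : Int) : Prop := out = sum_grid_alt grid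
instance (grid : List (List (List (List Int)))) (out : Int) : Decidable (Spec_sum_grid grid out) := by unfold Spec_sum_grid; infer_instance

-- ===== CLAIM (what is proved, stated in full; the proofs are below) =====
def Claim_equal_sum_grid : Prop := ∀ (grid : List (List (List (List Int)))), Dom_sum_grid grid → Spec_sum_grid grid (sum_grid grid)

-- ===== LEMMAS AND PROOFS =====

theorem foldl_add_shift {α : Type} (f : α → Int) (xs : List α) (t : Int) :
    xs.foldl (fun a e => a + f e) t = t + xs.foldl (fun a e => a + f e) 0 := by
  induction xs generalizing t with
  | nil => simp
  | cons h tl ih => rw [List.foldl_cons, List.foldl_cons, ih, ih (0 + f h)]; ring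

theorem lvl1 (y : List Int) (t : Int) :
    y.foldl (fun a v => a + v) t = t + deepSum1 y := by
  simpa using foldl_add_shift (fun v => v) y t

theorem lvl2 (z : List (List Int)) (t : Int) :
    z.foldl (fun t y => y.foldl (fun a v => a + v) t) t = t + deepSum2 z := by
  have h : z.foldl (fun t y => y.foldl (fun a v => a + v) t) t
      = z.foldl (fun t y => t + deepSum1 y) t := by
    induction z generalizing t with
    | nil => rfl
    | cons y tl ih => rw [List.foldl_cons, List.foldl_cons, lvl1, ih]
  rw [h, foldl_add_shift deepSum1]; rfl

theorem lvl3 (w : List (List (List Int))) (t : Int) :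
    w.foldl (fun t z => z.foldl (fun t y => y.foldl (fun a v => a + v) t) t) t
      = t + deepSum3 w := by
  have h : w.foldl (fun t z => z.foldl (fun t y => y.foldl (fun a v => a + v) t) t) t
      = w.foldl (fun t z => t + deepSum2 z) t := by
    induction w generalizing t with
    | nil => rfl
    | cons z tl ih => rw [List.foldl_cons, List.foldl_cons, lvl2, ih]
  rw [h, foldl_add_shift deepSum2]; rfl

theorem lvl4 (g : List (List (List (List Int)))) (t : Int) :
    g.foldl (fun t w => w.foldl (fun t z => z.foldl (fun t y => y.foldl (fun a v => a + v) t) t) t) t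
      = t + sum_grid_alt g := by
  have h : g.foldl (fun t w => w.foldl (fun t z => z.foldl (fun t y => y.foldl (fun a v => a + v) t) t) t) t
      = g.foldl (fun t w => t + deepSum3 w) t := by
    induction g generalizing t with
    | nil => rfl
    | cons w tl ih => rw [List.foldl_cons, List.foldl_cons, lvl3, ih]
  rw [h, foldl_add_shift deepSum3]; rfl

-- ===== VERDICT (by name: the statement is the Claim_ definition above) =====
theorem sum_grid_spec : Claim_equal_sum_grid := by
  intro grid _
  unfold Spec_sum_grid sum_grid
  simp only [PySem.List.foldl_pyRange_zero_pyGetD']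
  rw [lvl4]
  simp
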